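-- pv_equiv track=rewrite | github.com/comeputerwsy/frontend | QingJing-agent/devlop_home/data_process.py | limit_consecutive_zeros
-- ===== SOURCE A (Python) =====
-- def limit_consecutive_zeros(lst, max_zeros=10):
--     result = []
--     zero_count = 0
--
--     for num in lst:
--         if num == 0:
--             zero_count += 1
--             if zero_count <= max_zeros:
--                 result.append(num)
--         else:
--             zero_count = 0
--             result.append(num)
--
--     return result
-- ===== SOURCE B (Python) =====
-- def limit_consecutive_zeros(lst, max_zeros=10):
--     # Split the list into maximal runs of consecutive equal elements,
--     # truncate each zero run to its first max_zeros elements, keep other runs whole.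
--     result = []
--     i, n = 0, len(lst)
--     while i < n:
--         j = i + 1
--         while j < n and lst[j] == lst[i]:
--             j += 1
--         run = lst[i:j]
--         result.extend(run[:max(0, max_zeros)] if lst[i] == 0 else run)
--         i = j
--     return result
-- ===== Notes on version B (the rewrite author's own statement) =====
-- stated objective: alternative
-- what changed: B splits the list into maximal runs of consecutive equal elements and truncates each zero run to its first max(0, max_zeros) elements, instead of A's element-by-element scan with a running zero counter.
import Mathlib
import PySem

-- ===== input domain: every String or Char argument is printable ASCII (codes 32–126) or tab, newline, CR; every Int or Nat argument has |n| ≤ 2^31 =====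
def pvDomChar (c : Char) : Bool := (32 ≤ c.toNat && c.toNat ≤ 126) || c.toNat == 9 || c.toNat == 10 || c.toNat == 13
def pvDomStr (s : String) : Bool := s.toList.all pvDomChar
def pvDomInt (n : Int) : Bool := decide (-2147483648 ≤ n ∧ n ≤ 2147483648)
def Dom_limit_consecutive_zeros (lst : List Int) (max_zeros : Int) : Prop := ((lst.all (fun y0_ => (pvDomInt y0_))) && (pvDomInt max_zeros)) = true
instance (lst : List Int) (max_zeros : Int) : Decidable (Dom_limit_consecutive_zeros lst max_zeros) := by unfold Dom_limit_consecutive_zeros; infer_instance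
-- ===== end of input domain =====

-- B partitions the list into maximal runs of equal elements and truncates zero runs; A scans with a running zero counter. Alternative decomposition, same cost.

-- ===== PORT A =====
-- for num in lst: maintain (result, zero_count)
def limit_consecutive_zeros (lst : List Int) (max_zeros : Int) : List Int :=
  (lst.foldl (fun (s : List Int × Int) num =>
    if num = 0 then
      let zc := s.2 + 1
      ((if zc ≤ max_zeros then s.1 ++ [num] else s.1), zc)
    else
      (s.1 ++ [num], (0 : Int))) ([], 0)).1

-- ===== PORT B =====
-- the outer while loop of Source B: peel one maximal run off the front each step
def limitAltGo (lst : List Int) (max_zeros : Int) : List Int :=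
  match lst with
  | [] => []
  | x :: xs =>
    let run := x :: xs.takeWhile (· == x)   -- the inner while loop collecting the run
    let rest := xs.dropWhile (· == x)
    (if x = 0 then run.take (max 0 max_zeros).toNat else run) ++ limitAltGo rest max_zeros
termination_by lst.length
decreasing_by
  simp only [List.length_cons]
  exact Nat.lt_succ_of_le (List.length_dropWhile_le _ _)

def limit_consecutive_zeros_alt (lst : List Int) (max_zeros : Int) : List Int :=
  limitAltGo lst max_zeros

-- ===== PRECONDITION & SPEC =====
def Spec_limit_consecutive_zeros (lst : List Int) (max_zeros : Int) (out : List Int) : Prop := out = limit_consecutive_zeros_alt lst max_zeros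
instance (lst : List Int) (max_zeros : Int) (out : List Int) : Decidable (Spec_limit_consecutive_zeros lst max_zeros out) := by unfold Spec_limit_consecutive_zeros; infer_instance

-- ===== CLAIM (what is proved, stated in full; the proofs are below) =====
def Claim_equal_limit_consecutive_zeros : Prop := ∀ (lst : List Int) (max_zeros : Int), Dom_limit_consecutive_zeros lst max_zeros → Spec_limit_consecutive_zeros lst max_zeros (limit_consecutive_zeros lst max_zeros)

-- ===== LEMMAS AND PROOFS =====

-- recursive characterisation of A's appended output, generalised over the counter
def aGo (lst : List Int) (m zc : Int) : List Int :=
  match lst with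
  | [] => []
  | x :: xs =>
    if x = 0 then (if zc + 1 ≤ m then [x] else []) ++ aGo xs m (zc + 1)
    else x :: aGo xs m 0

theorem foldl_eq_aGo (lst : List Int) (m : Int) : ∀ (res : List Int) (zc : Int),
    (lst.foldl (fun (s : List Int × Int) num =>
      if num = 0 then
        let z := s.2 + 1
        ((if z ≤ m then s.1 ++ [num] else s.1), z)
      else
        (s.1 ++ [num], (0 : Int))) (res, zc)).1 = res ++ aGo lst m zc := by
  induction lst with
  | nil => intro res zc; simp [aGo]
  | cons x xs ih =>
    intro res zc
    simp only [List.foldl_cons]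
    by_cases hx : x = 0
    · subst hx
      by_cases hz : zc + 1 ≤ m
      · rw [if_pos hz, ih]; simp [aGo, hz]
      · rw [if_neg hz, ih]; simp [aGo, hz]
    · simp only [if_neg hx]
      rw [ih]; simp [aGo, hx]

theorem aGo_head_nonzero (rest : List Int) (m zc : Int)
    (h : ∀ y, rest.head? = some y → y ≠ 0) : aGo rest m zc = aGo rest m 0 := by
  cases rest with
  | nil => rfl
  | cons y ys =>
    have hy : y ≠ 0 := h y rfl
    simp [aGo, hy]

-- pass a block of nonzero elements straight through
theorem aGo_nonzero_append (tw rest : List Int) (m : Int)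
    (h : ∀ y ∈ tw, y ≠ 0) : aGo (tw ++ rest) m 0 = tw ++ aGo rest m 0 := by
  induction tw with
  | nil => rfl
  | cons y ys ih =>
    have hy : y ≠ 0 := h y (by simp)
    simp only [List.cons_append, aGo, hy]
    simp [ih (fun z hz => h z (by simp [hz]))]

-- a block of zeros yields its first max(0, m - zc) elements
theorem aGo_zero_append (rest : List Int) (m : Int)
    (hrest : ∀ y, rest.head? = some y → y ≠ 0) :
    ∀ (tw : List Int) (zc : Int), (∀ y ∈ tw, y = 0) →
    aGo (tw ++ rest) m zc = tw.take (max 0 (m - zc)).toNat ++ aGo rest m 0 := by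
  intro tw
  induction tw with
  | nil => intro zc _; simpa using aGo_head_nonzero rest m zc hrest
  | cons y ys ih =>
    intro zc h
    have hy : y = 0 := h y (by simp)
    have hys : ∀ z ∈ ys, z = 0 := fun z hz => h z (by simp [hz])
    by_cases hz : zc + 1 ≤ m
    · have h1 : (max 0 (m - zc)).toNat = ((max 0 (m - (zc + 1))).toNat) + 1 := by omega
      simp only [List.cons_append, aGo, hy, if_pos hz, ih (zc + 1) hys, h1]
      simp
    · have h1 : (max 0 (m - zc)).toNat = 0 := by omega
      have h2 : (max 0 (m - (zc + 1))).toNat = 0 := by omega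
      simp only [List.cons_append, aGo, hy, if_neg hz, ih (zc + 1) hys, h1, h2]
      simp

theorem head_dropWhile_ne (x : Int) (xs : List Int) :
    ∀ y, (xs.dropWhile (· == x)).head? = some y → y ≠ x := by
  intro y hy
  have := List.head?_dropWhile_not (p := (· == x)) (l := xs)
  cases hd : (xs.dropWhile (· == x)).head? with
  | none => simp [hd] at hy
  | some z =>
    rw [hd] at hy this
    simp at this
    cases hy; exact this

theorem aGo_eq_altGo (m : Int) : ∀ (n : Nat) (lst : List Int), lst.length ≤ n →
    aGo lst m 0 = limitAltGo lst m := by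
  intro n
  induction n with
  | zero =>
    intro lst h
    have : lst = [] := List.eq_nil_of_length_eq_zero (Nat.le_zero.mp h)
    subst this; simp [aGo, limitAltGo]
  | succ n ih =>
    intro lst hlen
    cases lst with
    | nil => simp [aGo, limitAltGo]
    | cons x xs =>
      have htw : ∀ y ∈ xs.takeWhile (· == x), y = x := by
        intro y hy
        have := List.mem_takeWhile_imp hy
        simpa using this
      have hsplit : xs = xs.takeWhile (· == x) ++ xs.dropWhile (· == x) :=
        (List.takeWhile_append_dropWhile).symm
      have hrec : aGo (xs.dropWhile (· == x)) m 0 = limitAltGo (xs.dropWhile (· == x)) m := by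
        apply ih
        have := List.length_dropWhile_le (p := (· == x)) xs
        simpa using Nat.le_trans this (Nat.succ_le_succ_iff.mp hlen)
      by_cases hx : x = 0
      · subst hx
        have hall : ∀ y ∈ (0 : Int) :: xs.takeWhile (· == (0:Int)), y = 0 := by
          intro y hy
          rcases List.mem_cons.mp hy with h | h
          · exact h
          · exact htw y h
        have hrest := head_dropWhile_ne 0 xs
        calc aGo ((0:Int) :: xs) m 0
            = aGo (((0:Int) :: xs.takeWhile (· == (0:Int))) ++ xs.dropWhile (· == (0:Int))) m 0 := by
              rw [List.cons_append, ← hsplit]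
          _ = ((0:Int) :: xs.takeWhile (· == (0:Int))).take (max 0 (m - 0)).toNat
                ++ aGo (xs.dropWhile (· == (0:Int))) m 0 :=
              aGo_zero_append _ m hrest _ 0 hall
          _ = limitAltGo ((0:Int) :: xs) m := by
              rw [hrec]
              simp only [limitAltGo]
              norm_num
      · have hall : ∀ y ∈ x :: xs.takeWhile (· == x), y ≠ 0 := by
          intro y hy
          rcases List.mem_cons.mp hy with h | h
          · exact h ▸ hx
          · exact (htw y h) ▸ hx
        calc aGo (x :: xs) m 0
            = aGo ((x :: xs.takeWhile (· == x)) ++ xs.dropWhile (· == x)) m 0 := by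
              rw [List.cons_append, ← hsplit]
          _ = (x :: xs.takeWhile (· == x)) ++ aGo (xs.dropWhile (· == x)) m 0 :=
              aGo_nonzero_append _ _ m hall
          _ = limitAltGo (x :: xs) m := by
              rw [hrec]; simp only [limitAltGo, if_neg hx]

-- ===== VERDICT (by name: the statement is the Claim_ definition above) =====
theorem limit_consecutive_zeros_spec : Claim_equal_limit_consecutive_zeros := by
  intro lst m _
  unfold Spec_limit_consecutive_zeros limit_consecutive_zeros limit_consecutive_zeros_alt
  rw [foldl_eq_aGo lst m [] 0]
  simpa using aGo_eq_altGo m lst.length lst (le_refl _)
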